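-- pv_equiv track=rewrite | github.com/bluemadisonblue/cs2data-telegram | faceit_api.py | group_rows_by_team
-- ===== SOURCE A (Python) =====
-- from typing import TYPE_CHECKING, Any
--
-- def group_rows_by_team(rows: list[dict[str, Any]]) -> tuple[list[dict], list[dict]]:
--     if not rows:
--         return [], []
--     team_ids = list(dict.fromkeys(r["team_id"] for r in rows))
--     if len(team_ids) < 2:
--         return rows, []
--     a, b = team_ids[0], team_ids[1]
--     left = [r for r in rows if r["team_id"] == a]
--     right = [r for r in rows if r["team_id"] == b]
--     return left, right
-- ===== SOURCE B (Python) =====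
-- def group_rows_by_team(rows):
--     a = None
--     b = None
--     left = []
--     right = []
--     for r in rows:
--         tid = r["team_id"]
--         if a is None:
--             a = tid
--             left.append(r)
--         elif tid == a:
--             left.append(r)
--         elif b is None:
--             b = tid
--             right.append(r)
--         elif tid == b:
--             right.append(r)
--     return left, right
-- ===== Notes on version B (the rewrite author's own statement) =====
-- stated objective: alternative
-- what changed: Replaces the dedup-pass-plus-two-filter-passes with a single traversal that discovers the two team ids on the fly and routes each row as it is seen.
import Mathlib
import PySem

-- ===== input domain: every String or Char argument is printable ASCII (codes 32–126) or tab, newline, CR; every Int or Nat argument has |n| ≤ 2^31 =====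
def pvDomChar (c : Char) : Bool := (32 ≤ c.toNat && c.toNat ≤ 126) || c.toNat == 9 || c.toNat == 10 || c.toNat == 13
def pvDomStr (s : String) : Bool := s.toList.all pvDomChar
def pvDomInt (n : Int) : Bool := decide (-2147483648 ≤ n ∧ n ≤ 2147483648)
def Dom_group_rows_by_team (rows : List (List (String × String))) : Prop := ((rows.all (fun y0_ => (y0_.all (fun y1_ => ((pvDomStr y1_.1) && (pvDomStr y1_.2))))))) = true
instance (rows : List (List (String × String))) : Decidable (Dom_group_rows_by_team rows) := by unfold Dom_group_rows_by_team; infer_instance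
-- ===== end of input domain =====

-- ===== PORT A =====
-- B makes one pass instead of A's dedup pass plus two filter passes; return values are proved equal.
-- Both ports read r["team_id"] as (Dict.get? r "team_id").getD ""; Pre_ excludes rows without the
-- key, on which both Pythons raise KeyError.
def tidOf (r : List (String × String)) : String := ((PySem.Dict.mk r).get? "team_id").getD ""

def group_rows_by_team (rows : List (List (String × String))) : (List (List (String × String))) × (List (List (String × String))) :=
  if rows = [] then ([], [])
  else
    let team_ids := PySem.List.dedup (rows.map tidOf)
    if team_ids.length < 2 then (rows, [])
    else
      match team_ids with
      | a :: b :: _ =>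
          (rows.filter (fun r => tidOf r == a), rows.filter (fun r => tidOf r == b))
      | _ => ([], [])   -- unreachable: length ≥ 2 here

-- ===== PORT B =====
def bStep (s : Option String × Option String × List (List (String × String)) × List (List (String × String)))
    (r : List (String × String)) :
    Option String × Option String × List (List (String × String)) × List (List (String × String)) :=
  let tid := tidOf r
  match s with
  | (none, b, l, rt) => (some tid, b, l ++ [r], rt)
  | (some a, b, l, rt) =>
    if tid == a then (some a, b, l ++ [r], rt)
    else
      match b with
      | none => (some a, some tid, l, rt ++ [r])
      | some bv => if tid == bv then (some a, some bv, l, rt ++ [r]) else (some a, some bv, l, rt)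

def group_rows_by_team_alt (rows : List (List (String × String))) : (List (List (String × String))) × (List (List (String × String))) :=
  let s := rows.foldl bStep (none, none, [], [])
  (s.2.2.1, s.2.2.2)

-- ===== PRECONDITION & SPEC =====
-- Pre_: every row has the key "team_id"; on a row without it both Pythons raise KeyError.
def Pre_group_rows_by_team (rows : List (List (String × String))) : Prop :=
  ∀ r ∈ rows, ((PySem.Dict.mk r).get? "team_id").isSome = true
instance (rows : List (List (String × String))) : Decidable (Pre_group_rows_by_team rows) := by unfold Pre_group_rows_by_team; infer_instance
def pvWitness_group_rows_by_team : (List (List (String × String))) :=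
  [[("team_id", "1"), ("p", "x")], [("team_id", "2")], [("team_id", "1")]]

def Spec_group_rows_by_team (rows : List (List (String × String))) (out : (List (List (String × String))) × (List (List (String × String)))) : Prop := out = group_rows_by_team_alt rows
instance (rows : List (List (String × String))) (out : (List (List (String × String))) × (List (List (String × String)))) : Decidable (Spec_group_rows_by_team rows out) := by unfold Spec_group_rows_by_team; infer_instance


-- ===== CLAIM (what is proved, stated in full; the proofs are below) =====
def Claim_equal_group_rows_by_team : Prop := ∀ (rows : List (List (String × String))), Dom_group_rows_by_team rows → Pre_group_rows_by_team rows → Spec_group_rows_by_team rows (group_rows_by_team rows)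

-- ===== LEMMAS AND PROOFS =====

-- foldl of Set.add only appends new elements
theorem foldl_add_append (ts : List String) (acc : List String) :
    ∃ tail, ts.foldl PySem.Set.add acc = acc ++ tail := by
  induction ts generalizing acc with
  | nil => exact ⟨[], by simp⟩
  | cons t ts ih =>
    simp only [List.foldl_cons]
    obtain ⟨tl, h⟩ := ih (PySem.Set.add acc t)
    have hadd : PySem.Set.add acc t =
        if PySem.Set.contains acc t then acc else acc ++ [t] := rfl
    by_cases hc : PySem.Set.contains acc t = true
    · exact ⟨tl, by rw [h, hadd, if_pos hc]⟩
    · exact ⟨t :: tl, by rw [h, hadd, if_neg hc]; simp⟩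

theorem foldl_add_const (ts : List String) (a : String) (h : ∀ t ∈ ts, t = a) :
    ts.foldl PySem.Set.add [a] = [a] := by
  induction ts with
  | nil => rfl
  | cons t ts ih =>
    have ht : t = a := h t (by simp)
    simp only [List.foldl_cons, ht]
    have : PySem.Set.add [a] a = [a] := by simp [PySem.Set.add, PySem.Set.contains]
    rw [this]
    exact ih (fun t ht' => h t (by simp [ht']))

-- with both ids fixed the loop is exactly the two filters
theorem bLoop_two (rows : List (List (String × String))) (a b : String) (hab : b ≠ a)
    (l rt : List (List (String × String))) :
    rows.foldl bStep (some a, some b, l, rt) =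
      (some a, some b, l ++ rows.filter (fun r => tidOf r == a),
        rt ++ rows.filter (fun r => tidOf r == b)) := by
  induction rows generalizing l rt with
  | nil => simp
  | cons r rows ih =>
    simp only [List.foldl_cons, List.filter_cons]
    by_cases ha : tidOf r = a
    · simp [bStep, ha, Ne.symm hab, ih]
    · by_cases hb : tidOf r = b
      · simp [bStep, hb, hab, ih]
      · simp [bStep, ha, hb, ih]

-- with only the first id fixed: the loop finds the second id at the first row whose tid differs
theorem bLoop_one (rows : List (List (String × String))) (a : String)
    (l : List (List (String × String))) :
    rows.foldl bStep (some a, none, l, []) =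
      match rows.find? (fun r => !(tidOf r == a)) with
      | none => (some a, none, l ++ rows, [])
      | some r0 =>
          (some a, some (tidOf r0), l ++ rows.filter (fun r => tidOf r == a),
            rows.filter (fun r => tidOf r == tidOf r0)) := by
  induction rows generalizing l with
  | nil => simp
  | cons r rows ih =>
    by_cases ha : tidOf r = a
    · have hstep : bStep (some a, none, l, []) r = (some a, none, l ++ [r], []) := by
        simp [bStep, ha]
      simp only [List.foldl_cons, hstep, ih (l ++ [r])]
      have hfind : (r :: rows).find? (fun r => !(tidOf r == a)) =
          rows.find? (fun r => !(tidOf r == a)) := by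
        rw [List.find?_cons_of_neg]; simp [ha]
      rw [hfind]
      cases hf : rows.find? (fun r => !(tidOf r == a)) with
      | none => simp
      | some r0 =>
        have hr0 : ¬ (tidOf r0 = a) := by
          have := List.find?_some hf
          simpa using this
        simp [ha, Ne.symm hr0]
    · have hstep : bStep (some a, none, l, []) r = (some a, some (tidOf r), l, [r]) := by
        simp [bStep, ha]
      simp only [List.foldl_cons, hstep]
      rw [bLoop_two rows a (tidOf r) ha l [r]]
      have hfind : (r :: rows).find? (fun r => !(tidOf r == a)) = some r := by
        rw [List.find?_cons_of_pos]; simp [ha]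
      rw [hfind]
      simp [ha]

theorem group_rows_by_team_spec : Claim_equal_group_rows_by_team := by
  intro rows _ _
  unfold Spec_group_rows_by_team
  cases rows with
  | nil => rfl
  | cons r rest =>
    unfold group_rows_by_team group_rows_by_team_alt
    have hstep : bStep (none, none, [], []) r = (some (tidOf r), none, [r], []) := by
      simp [bStep]
    simp only [List.foldl_cons, hstep, List.map_cons]
    rw [bLoop_one rest (tidOf r) [r]]
    have hded : PySem.List.dedup (tidOf r :: rest.map tidOf) =
        (rest.map tidOf).foldl PySem.Set.add [tidOf r] := by
      simp [PySem.List.dedup_eq_ofList, PySem.Set.ofList_eq_foldl, List.foldl_cons,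
        PySem.Set.add]
    cases hf : rest.find? (fun x => !(tidOf x == tidOf r)) with
    | none =>
      have hall : ∀ t ∈ rest.map tidOf, t = tidOf r := by
        intro t ht
        obtain ⟨x, hx, rfl⟩ := List.mem_map.mp ht
        have := List.find?_eq_none.mp hf x hx
        simpa using this
      rw [hded, foldl_add_const _ _ hall]
      simp
    | some r0 =>
      obtain ⟨p, s, hsplit, hpre⟩ := List.find?_eq_some_iff_append.mp hf |>.2
      have hr0 : ¬ (tidOf r0 = tidOf r) := by
        have := List.find?_some hf; simpa using this
      have hmap : rest.map tidOf = p.map tidOf ++ tidOf r0 :: s.map tidOf := by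
        rw [hsplit]; simp
      have hpall : ∀ t ∈ p.map tidOf, t = tidOf r := by
        intro t ht
        obtain ⟨x, hx, rfl⟩ := List.mem_map.mp ht
        have := hpre x hx; simpa using this
      have hfold : (rest.map tidOf).foldl PySem.Set.add [tidOf r] =
          (s.map tidOf).foldl PySem.Set.add [tidOf r, tidOf r0] := by
        rw [hmap, List.foldl_append, foldl_add_const _ _ hpall, List.foldl_cons]
        congr 1
        simp [PySem.Set.add, PySem.Set.contains, hr0]
      obtain ⟨tail, htail⟩ := foldl_add_append (s.map tidOf) [tidOf r, tidOf r0]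
      rw [hded, hfold, htail]
      simp [Ne.symm hr0]
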